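-- pv_equiv track=rewrite | github.com/oltaolloni/Detyra_DAA | Detyra/MaxPolygonPerimeter.py | max_polygon_perimeter
-- ===== SOURCE A (Python) =====
-- def max_polygon_perimeter(nums):
--     # Rendisim numrat në rritje
--     nums.sort()
--
--     # Përdorim një ndryshore për të ruajtur shumën totale të anëve
--     total_sum = sum(nums)
--
--     # Fillojmë duke përdorur të gjithë elementët dhe zvogëlojmë derisa të gjejmë një poligon të vlefshëm
--     for i in range(len(nums) - 1, 1, -1):  # Fillojmë nga ana më e gjatë dhe zvogëlojmë
--         if total_sum - nums[i] > nums[i]:  # Kontrollojmë nëse mund të krijohet një poligon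
--             return total_sum  # Kthejmë perimetrin më të madh të mundshëm
--         total_sum -= nums[i]  # Hiq anën më të madhe dhe vazhdo
--
--     return -1  # Nëse nuk gjendet poligon i vlefshëm, kthejmë -1
-- ===== SOURCE B (Python) =====
-- def max_polygon_perimeter(nums):
--     # Selection instead of sorting: repeatedly extract the current maximum
--     # side and test whether the remaining sides outweigh it.  No sort at
--     # all; nums itself is not mutated (return-value equivalence with A).
--     sides = list(nums)
--     total = sum(sides)
--     while len(sides) >= 3:
--         longest = max(sides)
--         if total - longest > longest:
--             return total
--         sides.remove(longest)
--         total -= longest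
--     return -1
-- ===== Notes on version B (the rewrite author's own statement) =====
-- stated objective: alternative
-- what changed: Replaces A's sort-then-backward-scan (suffix total peeled index by index over the sorted array) by a sort-free selection loop that repeatedly extracts the current maximum with max()/remove() and tests it against the remaining total; trades A's O(n log n) sort for an O(n^2)-worst-case but allocation-light repeated-selection scheme.
import Mathlib
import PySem

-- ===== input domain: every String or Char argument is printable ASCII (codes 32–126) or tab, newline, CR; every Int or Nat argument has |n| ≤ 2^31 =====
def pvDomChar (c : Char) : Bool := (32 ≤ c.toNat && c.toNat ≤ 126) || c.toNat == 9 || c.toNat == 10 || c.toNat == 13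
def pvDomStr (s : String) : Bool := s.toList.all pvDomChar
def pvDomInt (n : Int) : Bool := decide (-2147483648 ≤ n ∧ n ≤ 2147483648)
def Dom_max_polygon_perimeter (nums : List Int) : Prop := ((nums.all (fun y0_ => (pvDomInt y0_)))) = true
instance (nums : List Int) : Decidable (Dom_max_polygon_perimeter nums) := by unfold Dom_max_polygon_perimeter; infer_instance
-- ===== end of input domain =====

-- B replaces A's sort-then-backward-scan by a sort-free repeated max-extraction loop; return-value equivalence only — A sorts nums in place, B does not mutate it.

-- ===== PORT A =====
-- the early-returning 'for i in range(len(nums)-1, 1, -1)' loop, recursion over the index list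
def pvALoop (s : List Int) : List Int → Int → Int
  | [], _ => -1
  | i :: rest, total =>
    if total - PySem.List.pyGetD s i 0 > PySem.List.pyGetD s i 0 then total
    else pvALoop s rest (total - PySem.List.pyGetD s i 0)

def max_polygon_perimeter (nums : List Int) : Int :=
  let s := PySem.List.sorted nums (fun x => x) false   -- nums.sort()
  let total_sum := s.sum                                -- sum(nums) after the in-place sort
  pvALoop s (PySem.List.pyRange ((s.length : Int) - 1) 1 (-1)) total_sum

-- ===== PORT B =====
-- termination helper for pvBGo: max(sides) is a member of sides
theorem pvFoldlMaxMem (a : Int) (t : List Int) : t.foldl max a ∈ a :: t :=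
  PySem.List.max?_mem (PySem.List.max?_id_cons a t)

-- the 'while len(sides) >= 3' selection loop; 'max(sides)' per PySem.List.max?_id_cons,
-- 'sides.remove(longest)' is List.erase per PySem.List.remove?_eq_some_erase
def pvBGo : List Int → Int → Int
  | [], _ => -1
  | [_], _ => -1
  | [_, _], _ => -1
  | a :: b :: c :: rest, total =>
    let longest := (b :: c :: rest).foldl max a
    if total - longest > longest then total
    else pvBGo ((a :: b :: c :: rest).erase longest) (total - longest)
termination_by xs _ => xs.length
decreasing_by
  rw [List.length_erase_of_mem (pvFoldlMaxMem a (b :: c :: rest))]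
  simp

def max_polygon_perimeter_alt (nums : List Int) : Int :=
  pvBGo nums nums.sum

-- ===== PRECONDITION & SPEC =====
def Spec_max_polygon_perimeter (nums : List Int) (out : Int) : Prop := out = max_polygon_perimeter_alt nums
instance (nums : List Int) (out : Int) : Decidable (Spec_max_polygon_perimeter nums out) := by unfold Spec_max_polygon_perimeter; infer_instance

-- ===== CLAIM (what is proved, stated in full; the proofs are below) =====
def Claim_equal_max_polygon_perimeter : Prop := ∀ (nums : List Int), Dom_max_polygon_perimeter nums → Spec_max_polygon_perimeter nums (max_polygon_perimeter nums)

-- ===== LEMMAS AND PROOFS =====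

-- A's loop only looks at the list through pyGetD at the visited indices
theorem pvALoop_congr (s₁ s₂ : List Int) (idxs : List Int) (t : Int)
    (h : ∀ i ∈ idxs, PySem.List.pyGetD s₁ i 0 = PySem.List.pyGetD s₂ i 0) :
    pvALoop s₁ idxs t = pvALoop s₂ idxs t := by
  induction idxs generalizing t with
  | nil => rfl
  | cons i rest ih =>
    simp only [pvALoop, h i (by simp)]
    split
    · rfl
    · exact ih _ (fun j hj => h j (by simp [hj]))

-- abbreviation for A's whole computation on a given list (its own sorted copy and its sum)
def pvAFull (xs : List Int) : Int :=
  pvALoop (PySem.List.sorted xs (fun x => x) false)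
    (PySem.List.pyRange (((PySem.List.sorted xs (fun x => x) false).length : Int) - 1) 1 (-1))
    (PySem.List.sorted xs (fun x => x) false).sum

-- the selection loop computes exactly A's value, by strong induction on the length
theorem pvMain : ∀ (n : Nat) (xs : List Int), xs.length = n → pvBGo xs xs.sum = pvAFull xs := by
  intro n
  induction n using Nat.strong_induction_on with
  | _ n ih =>
    intro xs hlen
    rcases xs with _ | ⟨a, _ | ⟨b, _ | ⟨c, rest⟩⟩⟩
    case nil | cons.nil | cons.cons.nil =>
      -- fewer than three sides: both loops do nothing and give -1
      all_goals
        unfold pvAFull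
        rw [PySem.List.pyRange_neg_one_eq_nil
              (by simp only [PySem.List.length_sorted, List.length_cons, List.length_nil]; omega)]
        simp [pvBGo, pvALoop]
    case cons.cons.cons =>
      -- names for the pieces
      have hm_mem : ((b :: c :: rest).foldl max a) ∈ (a :: b :: c :: rest) :=
        pvFoldlMaxMem a (b :: c :: rest)
      have hm_ub : ∀ y ∈ (a :: b :: c :: rest), y ≤ (b :: c :: rest).foldl max a := by
        have := PySem.List.max?_isMax (PySem.List.max?_id_cons a (b :: c :: rest))
        simpa using this
      set xs : List Int := a :: b :: c :: rest with hxs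
      set m : Int := (b :: c :: rest).foldl max a with hm
      set s : List Int := PySem.List.sorted xs (fun x => x) false with hs
      have hperm : s.Perm xs := PySem.List.sorted_perm xs (fun x => x) false
      have hslen : s.length = rest.length + 3 := by
        rw [hs, PySem.List.length_sorted]; simp [hxs]
      have hsne : s ≠ [] := by intro h; rw [h] at hslen; simp at hslen
      set s' : List Int := s.dropLast with hs'
      set v : Int := s.getLast hsne with hv
      have hdecomp : s' ++ [v] = s := List.dropLast_append_getLast hsne
      have hpw : s.Pairwise (fun x y => x ≤ y) := by
        have := PySem.List.sorted_pairwise xs (fun x => x)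
        simpa using this
      have hv_eq : v = m := by
        have hv_mem : v ∈ xs :=
          (PySem.List.mem_sorted _ _ _ _).1 (List.getLast_mem hsne)
        have h1 : v ≤ m := hm_ub v hv_mem
        have hm_in_s : m ∈ s := (PySem.List.mem_sorted _ _ _ _).2 hm_mem
        have h2 : m ≤ v := by
          rw [← hdecomp] at hm_in_s hpw
          rcases List.mem_append.1 hm_in_s with h | h
          · exact (List.pairwise_append.1 hpw).2.2 m h v (by simp)
          · simp at h; omega
        omega
      have hs_eq : s = s' ++ [m] := by rw [← hv_eq, hdecomp]
      have hs'len : s'.length = rest.length + 2 := by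
        have := congrArg List.length hs_eq
        simp at this; omega
      set ys : List Int := xs.erase m with hys
      have hxs_perm : xs.Perm (m :: ys) := List.perm_cons_erase hm_mem
      have hys_perm : ys.Perm s' := by
        have h1 : (s.erase m).Perm ys := hperm.erase m
        have h2 : s.Perm (m :: s') := by
          rw [hs_eq]; exact List.perm_append_singleton m s'
        have h3 : s.Perm (m :: s.erase m) :=
          List.perm_cons_erase (by rw [hs_eq]; simp)
        exact h1.symm.trans ((h3.symm.trans h2).cons_inv)
      have hs'_pw : s'.Pairwise (fun x y => x ≤ y) := by
        rw [← hdecomp] at hpw; exact (List.pairwise_append.1 hpw).1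
      have hsorted_ys : PySem.List.sorted ys (fun x => x) false = s' :=
        PySem.List.sorted_id_eq_of_perm_of_pairwise ys s' hys_perm.symm hs'_pw
      have hsum : xs.sum = m + ys.sum := by rw [hxs_perm.sum_eq]; simp
      have hys_len : ys.length = rest.length + 2 := by
        rw [hys, List.length_erase_of_mem hm_mem]; simp [hxs]
      -- unfold one step of B
      have hB : pvBGo xs xs.sum =
          if xs.sum - m > m then xs.sum else pvBGo ys (xs.sum - m) := by
        rw [hxs]; simp only [pvBGo]; rfl
      -- unfold one step of A
      unfold pvAFull
      rw [← hs, hperm.sum_eq,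
          PySem.List.pyRange_neg_one_cons (show (1:Int) < (s.length : Int) - 1 by
            rw [hslen]; push_cast; omega)]
      have hget : PySem.List.pyGetD s ((s.length : Int) - 1) 0 = m := by
        have hidx : ((s.length : Int) - 1) = ((s'.length : Nat) : Int) := by
          rw [hslen, hs'len]; push_cast; omega
        rw [hidx, hs_eq, PySem.List.pyGetD_eq_getElem _ _ (by positivity) (by simp)]
        simp
      simp only [pvALoop, hget]
      rw [hB]
      by_cases hc : xs.sum - m > m
      · rw [if_pos hc, if_pos hc]
      · rw [if_neg hc, if_neg hc]
        have hcongr : pvALoop s (PySem.List.pyRange ((s.length : Int) - 1 - 1) 1 (-1)) (xs.sum - m)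
            = pvALoop s' (PySem.List.pyRange ((s.length : Int) - 1 - 1) 1 (-1)) (xs.sum - m) := by
          apply pvALoop_congr
          intro i hi
          rw [PySem.List.mem_pyRange_neg_one] at hi
          rw [hslen] at hi
          push_cast at hi
          have h1 : i < (s.length : Int) := by rw [hslen]; push_cast; omega
          have h2 : i < (s'.length : Int) := by rw [hs'len]; push_cast; omega
          have h2n : i.toNat < s'.length := by rw [hs'len]; omega
          rw [PySem.List.pyGetD_eq_getElem _ _ (by omega) h1,
              PySem.List.pyGetD_eq_getElem _ _ (by omega) h2]
          simp only [hs_eq]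
          rw [List.getElem_append_left h2n]
        rw [hcongr]
        have hn : rest.length + 3 = n := by simpa [hxs] using hlen
        have hih := ih (rest.length + 2) (by omega) ys hys_len
        unfold pvAFull at hih
        rw [hsorted_ys] at hih
        have hsum' : xs.sum - m = ys.sum := by omega
        have hrange : ((s.length : Int) - 1 - 1) = ((s'.length : Int) - 1) := by
          rw [hslen, hs'len]; push_cast; omega
        rw [hsum', hrange]
        exact hih.trans (by rw [← hys_perm.sum_eq])

-- ===== VERDICT (by name: the statement is the Claim_ definition above) =====
theorem max_polygon_perimeter_spec : Claim_equal_max_polygon_perimeter := by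
  intro nums _
  unfold Spec_max_polygon_perimeter max_polygon_perimeter max_polygon_perimeter_alt
  exact (pvMain nums.length nums rfl).symm
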